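-- pv_equiv track=rewrite | github.com/HeliosC/AdventOfCode2022-2023 | 2023/1/main.py | findCalibration
-- ===== SOURCE A (Python) =====
-- def findCalibration(line):
--     start = 0
--     end = -1
--     lineLen = len(line)
--     while start < lineLen and not line[start].isdigit():
--         start += 1
--
--     while end > -lineLen and not line[end].isdigit():
--         end -= 1
--
--     if end <= -lineLen and start >= lineLen:
--         return 0
--     elif end <= -lineLen:
--         return int(line[start] + line[start])
--     elif start >= lineLen:
--         return int(line[end] + line[end])
--     else:
--         return int(line[start] + line[end])
-- ===== SOURCE B (Python) =====
-- def findCalibration(line):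
--     digits = [c for c in line if c.isdigit()]
--     if not digits:
--         return 0
--     return int(digits[0] + digits[-1])
-- ===== Notes on version B (the rewrite author's own statement) =====
-- stated objective: simpler
-- what changed: Replaces the two early-stopping pointer scans (forward index and negative backward index) plus a four-way branch with one forward pass collecting all digit characters and indexing its first and last element.
import Mathlib
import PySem

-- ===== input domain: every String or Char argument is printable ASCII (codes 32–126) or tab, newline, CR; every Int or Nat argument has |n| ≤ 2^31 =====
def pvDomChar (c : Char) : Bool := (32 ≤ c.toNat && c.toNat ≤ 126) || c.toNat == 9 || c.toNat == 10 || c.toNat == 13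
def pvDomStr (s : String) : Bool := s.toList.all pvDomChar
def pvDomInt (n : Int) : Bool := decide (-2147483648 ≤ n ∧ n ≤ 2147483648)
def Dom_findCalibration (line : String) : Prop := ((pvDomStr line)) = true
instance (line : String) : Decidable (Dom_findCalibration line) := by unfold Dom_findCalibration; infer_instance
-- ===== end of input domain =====

-- B replaces A's two early-stopping pointer scans with one digit-collecting pass; objective: simpler.

-- ===== PORT A =====
-- line[i] for an index A's loop guards keep in range (the default of getD is never read in range)
def pvCharAt (cs : List Char) (i : Int) : Char := (PySem.List.pyGet? cs i).getD 'A'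

-- int(x + y) for a concatenation of two single characters (both A and B form such a string and call int;
-- int never raises here since both programs only feed digit characters)
def pvInt2 (x y : Char) : Int := (PySem.Int.ofChars? [x, y]).getD 0

-- while start < lineLen and not line[start].isdigit(): start += 1
def pvStartLoop (cs : List Char) (n start : Int) : Int :=
  if h : start < n ∧ ¬ PySem.Chars.isdigit (pvCharAt cs start) then
    pvStartLoop cs n (start + 1)
  else start
termination_by (n - start).toNat
decreasing_by omega

-- while end > -lineLen and not line[end].isdigit(): end -= 1
def pvEndLoop (cs : List Char) (n e : Int) : Int :=
  if h : e > -n ∧ ¬ PySem.Chars.isdigit (pvCharAt cs e) then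
    pvEndLoop cs n (e - 1)
  else e
termination_by (e + n).toNat
decreasing_by omega

def findCalibration (line : String) : Int :=
  let cs := line.toList
  let lineLen : Int := PySem.Chars.len cs
  let start := pvStartLoop cs lineLen 0
  let e := pvEndLoop cs lineLen (-1)
  if e ≤ -lineLen ∧ start ≥ lineLen then 0
  else if e ≤ -lineLen then pvInt2 (pvCharAt cs start) (pvCharAt cs start)
  else if start ≥ lineLen then pvInt2 (pvCharAt cs e) (pvCharAt cs e)
  else pvInt2 (pvCharAt cs start) (pvCharAt cs e)

-- ===== PORT B =====
def findCalibration_alt (line : String) : Int :=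
  let digits := line.toList.filter PySem.Chars.isdigit
  if digits = [] then 0
  else pvInt2 ((PySem.List.pyGet? digits 0).getD 'A')
             ((PySem.List.pyGet? digits (-1)).getD 'A')

-- ===== PRECONDITION & SPEC =====
def Spec_findCalibration (line : String) (out : Int) : Prop := out = findCalibration_alt line
instance (line : String) (out : Int) : Decidable (Spec_findCalibration line out) := by unfold Spec_findCalibration; infer_instance

-- ===== CLAIM (what is proved, stated in full; the proofs are below) =====
def Claim_equal_findCalibration : Prop := ∀ (line : String), Dom_findCalibration line → Spec_findCalibration line (findCalibration line)

-- ===== LEMMAS AND PROOFS =====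

-- A's forward scan stops exactly after the non-digit prefix of the remaining suffix.
theorem pvStartLoop_eq (m : Nat) : ∀ (cs : List Char) (k : Nat), cs.length - k = m → k ≤ cs.length →
    pvStartLoop cs cs.length k =
      (k : Int) + ((cs.drop k).takeWhile (fun c => !PySem.Chars.isdigit c)).length := by
  induction m with
  | zero =>
    intro cs k hm hk
    have hkeq : k = cs.length := by omega
    rw [pvStartLoop, dif_neg (by simp [hkeq])]
    simp [hkeq, List.drop_length]
  | succ m ih =>
    intro cs k hm hk
    have hklt : k < cs.length := by omega
    have hget : pvCharAt cs (k : Int) = cs[k] := by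
      simp [pvCharAt, PySem.List.pyGet?_natCast, List.getElem?_eq_getElem hklt]
    have hdrop : cs.drop k = cs[k] :: cs.drop (k + 1) := List.drop_eq_getElem_cons hklt
    rw [pvStartLoop]
    by_cases hd : PySem.Chars.isdigit cs[k]
    · rw [dif_neg (by simp [hget, hd])]
      rw [hdrop, List.takeWhile_cons_of_neg (by simp [hd])]
      simp
    · rw [dif_pos ⟨by exact_mod_cast hklt, by simp [hget, hd]⟩]
      have hcast : (k : Int) + 1 = ((k + 1 : Nat) : Int) := by push_cast; ring
      rw [hcast, ih cs (k + 1) (by omega) (by omega)]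
      rw [hdrop, List.takeWhile_cons_of_pos (by simp [hd])]
      simp only [List.length_cons]
      push_cast; ring

-- A's backward scan, phrased on the reversed list: entered at offset j from the right it stops
-- after the non-digit prefix of cs.reverse.drop j, but never below index -(length).
theorem pvEndLoop_eq (m : Nat) : ∀ (cs : List Char) (j : Nat), j < cs.length → cs.length - 1 - j = m →
    pvEndLoop cs cs.length (-((j + 1 : Nat) : Int)) =
      -(((min (j + ((cs.reverse.drop j).takeWhile (fun c => !PySem.Chars.isdigit c)).length)
              (cs.length - 1) : Nat) : Int) + 1) := by
  induction m with
  | zero =>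
    intro cs j hj hm
    have hjeq : j = cs.length - 1 := by omega
    rw [pvEndLoop, dif_neg (by push_cast; omega)]
    have hmin : min (j + ((cs.reverse.drop j).takeWhile (fun c => !PySem.Chars.isdigit c)).length)
              (cs.length - 1) = j := by omega
    rw [hmin]
    push_cast; ring
  | succ m ih =>
    intro cs j hj hm
    have hjr : j < cs.reverse.length := by simpa using hj
    have hget : pvCharAt cs (-((j + 1 : Nat) : Int)) = cs.reverse[j] := by
      have h1 : PySem.List.pyGet? cs (-((j + 1 : Nat) : Int)) = cs[cs.length - (j + 1)]? :=
        PySem.List.pyGet?_neg_natCast cs (j + 1) (by omega) (by omega)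
      have h2 : cs.reverse[j]? = cs[cs.length - 1 - j]? := List.getElem?_reverse hj
      have h3 : cs.length - (j + 1) = cs.length - 1 - j := by omega
      unfold pvCharAt
      rw [h1, h3, ← h2, List.getElem?_eq_getElem hjr]
      rfl
    have hdrop : cs.reverse.drop j = cs.reverse[j] :: cs.reverse.drop (j + 1) :=
      List.drop_eq_getElem_cons hjr
    have hrev : cs.reverse[j] = cs[cs.length - 1 - j] := by
      rw [List.getElem_reverse]
    rw [pvEndLoop]
    by_cases hd : PySem.Chars.isdigit cs.reverse[j]
    · rw [dif_neg (by rw [hget]; exact fun h => h.2 hd)]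
      rw [hdrop, List.takeWhile_cons_of_neg (by simp [hrev ▸ hd])]
      have hmin : min (j + (List.nil (α := Char)).length) (cs.length - 1) = j := by
        simp; omega
      rw [hmin]
      push_cast; ring
    · rw [dif_pos ⟨by push_cast; omega, by rw [hget]; exact hd⟩]
      have hcast : -((j + 1 : Nat) : Int) - 1 = -((j + 1 + 1 : Nat) : Int) := by push_cast; ring
      rw [hcast, ih cs (j + 1) (by omega) (by omega)]
      have hd' : PySem.Chars.isdigit cs[cs.length - 1 - j] = false := by
        rw [← hrev]; simpa using hd
      rw [hdrop, List.takeWhile_cons_of_pos (by simp [hrev, hd'])]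
      simp only [List.length_cons]
      omega

-- the first digit of cs sits right after the non-digit prefix
theorem head_filter_at (cs : List Char) :
    (cs.filter PySem.Chars.isdigit).head? =
      cs[(cs.takeWhile (fun c => !PySem.Chars.isdigit c)).length]? := by
  have hsplit : cs.takeWhile (fun c => !PySem.Chars.isdigit c) ++
      cs.dropWhile (fun c => !PySem.Chars.isdigit c) = cs :=
    List.takeWhile_append_dropWhile
  have h4 : (cs.takeWhile (fun c => !PySem.Chars.isdigit c) ++
        cs.dropWhile (fun c => !PySem.Chars.isdigit c))[(cs.takeWhile
          (fun c => !PySem.Chars.isdigit c)).length]? =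
      (cs.dropWhile (fun c => !PySem.Chars.isdigit c)).head? := by
    rw [List.getElem?_append_right (le_refl _), Nat.sub_self, ← List.head?_eq_getElem?]
  rw [hsplit] at h4
  rw [List.head?_filter, List.find?_eq_head?_dropWhile_not PySem.Chars.isdigit cs, ← h4]

-- ===== VERDICT (by name: the statement is the Claim_ definition above) =====
theorem findCalibration_spec : Claim_equal_findCalibration := by
  intro line _
  show findCalibration line = findCalibration_alt line
  simp only [findCalibration, findCalibration_alt, PySem.Chars.len_eq]
  set cs := line.toList with hcs
  by_cases hn0 : cs.length = 0
  · have hnil : cs = [] := List.eq_nil_of_length_eq_zero hn0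
    rw [hnil]
    simp [pvStartLoop, pvEndLoop]
  · have hn : 0 < cs.length := Nat.pos_of_ne_zero hn0
    have hstart := pvStartLoop_eq cs.length cs 0 (by omega) (by omega)
    simp only [Nat.cast_zero, List.drop_zero, zero_add] at hstart
    have hend := pvEndLoop_eq (cs.length - 1) cs 0 (by omega) (by omega)
    simp only [List.drop_zero, zero_add, Nat.cast_one] at hend
    norm_num at hend
    by_cases hf : cs.filter PySem.Chars.isdigit = []
    · have hall : ∀ x ∈ cs, ¬ PySem.Chars.isdigit x = true := List.filter_eq_nil_iff.mp hf
      have ht : (cs.takeWhile (fun c => !PySem.Chars.isdigit c)).length = cs.length := by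
        rw [List.takeWhile_eq_self_iff.mpr (by intro x hx; simpa using hall x hx)]
      have ht' : (cs.reverse.takeWhile (fun c => !PySem.Chars.isdigit c)).length = cs.length := by
        rw [List.takeWhile_eq_self_iff.mpr
          (by intro x hx; simpa using hall x (List.mem_reverse.mp hx))]
        simp
      rw [hstart, hend, ht, ht', if_pos (by constructor <;> omega), if_pos hf]
    · set df := cs.filter PySem.Chars.isdigit with hdf
      obtain ⟨d0, hd0⟩ : ∃ d0, df.head? = some d0 := ⟨df.head hf, List.head?_eq_some_head hf⟩
      obtain ⟨dl, hdl⟩ : ∃ dl, df.getLast? = some dl := ⟨df.getLast hf, List.getLast?_eq_some_getLast hf⟩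
      have hidx0 : cs[(cs.takeWhile (fun c => !PySem.Chars.isdigit c)).length]? = some d0 := by
        rw [← head_filter_at]; exact hd0
      have ht_lt : (cs.takeWhile (fun c => !PySem.Chars.isdigit c)).length < cs.length := by
        rcases List.getElem?_eq_some_iff.mp hidx0 with ⟨h, _⟩; exact h
      have hidxr : cs.reverse[(cs.reverse.takeWhile (fun c => !PySem.Chars.isdigit c)).length]? =
          some dl := by
        rw [← head_filter_at cs.reverse, List.filter_reverse, List.head?_reverse]
        exact hdl
      have ht'_lt : (cs.reverse.takeWhile (fun c => !PySem.Chars.isdigit c)).length <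
          cs.length := by
        rcases List.getElem?_eq_some_iff.mp hidxr with ⟨h, _⟩; simpa using h
      have hidxlast :
          cs[cs.length - 1 - (cs.reverse.takeWhile (fun c => !PySem.Chars.isdigit c)).length]? =
            some dl := by
        rw [← List.getElem?_reverse (by simpa using ht'_lt)]
        exact hidxr
      have hdldig : PySem.Chars.isdigit dl = true := by
        have hmem : dl ∈ df := List.mem_of_getLast? hdl
        exact (List.mem_filter.mp (hdf ▸ hmem)).2
      have hb0 : (PySem.List.pyGet? df 0).getD 'A' = d0 := by
        rw [show (0 : Int) = ((0 : Nat) : Int) from rfl, PySem.List.pyGet?_natCast,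
          ← List.head?_eq_getElem?, hd0]
        rfl
      have hb1 : (PySem.List.pyGet? df (-1)).getD 'A' = dl := by
        rw [PySem.List.pyGet?_neg_one, hdl]
        rfl
      have hA0 : pvCharAt cs ((cs.takeWhile (fun c => !PySem.Chars.isdigit c)).length : Int) =
          d0 := by
        unfold pvCharAt
        rw [PySem.List.pyGet?_natCast, hidx0]
        rfl
      rw [if_neg hf, hb0, hb1, hstart, hend,
        min_eq_left (show ((cs.reverse.takeWhile
            (fun c => !PySem.Chars.isdigit c)).length : Int) ≤ ((cs.length - 1 : Nat) : Int)
          by omega)]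
      rw [if_neg (by rintro ⟨-, h2⟩; omega)]
      by_cases hedge :
          (cs.reverse.takeWhile (fun c => !PySem.Chars.isdigit c)).length + 1 = cs.length
      · rw [if_pos (by omega)]
        have h00 : cs[(0 : Nat)]? = some dl := by
          have h := hidxlast
          rwa [show cs.length - 1 -
            (cs.reverse.takeWhile (fun c => !PySem.Chars.isdigit c)).length = 0 by omega] at h
        have ht0 : (cs.takeWhile (fun c => !PySem.Chars.isdigit c)).length = 0 := by
          have htw : cs.takeWhile (fun c => !PySem.Chars.isdigit c) = [] := by
            rw [List.takeWhile_eq_nil_iff]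
            intro hl
            have hc0 : cs[0] = dl := by
              rcases List.getElem?_eq_some_iff.mp h00 with ⟨h, heq⟩; exact heq
            simp [hc0, hdldig]
          rw [htw]
          rfl
        have hd0dl : d0 = dl := by
          rw [ht0] at hidx0
          exact Option.some.inj (hidx0.symm.trans h00)
        rw [hA0, hd0dl]
      · rw [if_neg (by omega), if_neg (by rintro h2; omega)]
        have hAe : pvCharAt cs
            (-1 + -((cs.reverse.takeWhile (fun c => !PySem.Chars.isdigit c)).length : Int)) =
              dl := by
          unfold pvCharAt
          rw [show (-1 + -((cs.reverse.takeWhile (fun c => !PySem.Chars.isdigit c)).length : Int))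
              = -(((cs.reverse.takeWhile (fun c => !PySem.Chars.isdigit c)).length + 1 : Nat) : Int)
            by push_cast; ring]
          rw [PySem.List.pyGet?_neg_natCast cs _ (by omega) (by omega),
            show cs.length - ((cs.reverse.takeWhile (fun c => !PySem.Chars.isdigit c)).length + 1)
              = cs.length - 1 - (cs.reverse.takeWhile (fun c => !PySem.Chars.isdigit c)).length
            by omega, hidxlast]
          rfl
        rw [hA0, hAe]
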